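-- pv_equiv track=rewrite | github.com/TUYISINGIZE750/rtb-document-planner | backend/enhanced_document_generator.py | get_default_references
-- ===== SOURCE A (Python) =====
-- def get_default_references(module, topic, learning_outcomes, indicative_contents):
--     """Get default static references based on content"""
--     references = []
--
--     content_lower = f"{topic} {module}".lower() if topic and module else ""
--
--     # Programming/ICT references
--     if any(term in content_lower for term in ['programming', 'python', 'java', 'code', 'software', 'variable', 'datatype', 'algorithm', 'loop', 'array', 'function']):
--         references = [
--             "Deitel, P., & Deitel, H. (2019). Python for programmers. Pearson Education. Retrieved from https://www.pearson.com",
--             "McConnell, S. (2004). Code complete: A practical handbook of software construction. Microsoft Press. Retrieved from https://www.microsoft.com",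
--             "Matthes, E. (2019). Python crash course: A hands-on, project-based introduction to programming. No Starch Press. Retrieved from https://www.nostarch.com",
--             "Downey, A. (2015). Think Python: How to think like a computer scientist. O'Reilly Media. Retrieved from https://www.oreilly.com",
--             "Hunt, A., & Thomas, D. (2019). The pragmatic programmer (2nd ed.). Addison-Wesley. Retrieved from https://pragprog.com"
--         ]
--     # Networking references
--     elif any(term in content_lower for term in ['network', 'cisco', 'routing', 'switching', 'tcp', 'ip', 'internet', 'firewall']):
--         references = [
--             "Tanenbaum, A. S., & Wetherall, D. J. (2021). Computer networks (6th ed.). Pearson Education. Retrieved from https://www.pearson.com",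
--             "Kurose, J. F., & Ross, K. W. (2020). Computer networking: A top-down approach (8th ed.). Pearson. Retrieved from https://www.pearson.com",
--             "Odom, W. (2019). CCNA 200-301 official cert guide library (2nd ed.). Cisco Press. Retrieved from https://www.ciscopress.com",
--             "Cisco Networking Academy. (2020). CCNA routing and switching course materials. Cisco Systems. Retrieved from https://www.cisco.com",
--             "Doyle, J. C., Alderson, D. L., & Willinger, W. (2015). Internet topology and the evolution of the Internet. ACM Transactions. Retrieved from https://www.acm.org"
--         ]
--     # Database references
--     elif any(term in content_lower for term in ['database', 'sql', 'mysql', 'data management', 'data modeling', 'nosql']):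
--         references = [
--             "Elmasri, R., & Navathe, S. B. (2020). Fundamentals of database systems (8th ed.). Pearson Education. Retrieved from https://www.pearson.com",
--             "Coronel, C., & Morris, S. (2019). Database systems: Design, implementation, and management (13th ed.). Cengage. Retrieved from https://www.cengage.com",
--             "Beaulieu, A. (2020). Learning SQL: Generate, manipulate, and retrieve data (3rd ed.). O'Reilly Media. Retrieved from https://www.oreilly.com",
--             "Garcia-Molina, H., Ullman, J. D., & Widom, J. (2008). Database systems: The complete book (2nd ed.). Prentice Hall. Retrieved from https://www.pearson.com",
--             "DuBois, P. (2020). MySQL cookbook: Solutions for database developers and administrators. O'Reilly. Retrieved from https://www.oreilly.com"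
--         ]
--     # Web development references
--     elif any(term in content_lower for term in ['web', 'html', 'css', 'javascript', 'frontend', 'responsive', 'react', 'vue']):
--         references = [
--             "Duckett, J. (2014). HTML and CSS: Design and build websites. Wiley Publishing. Retrieved from https://www.wiley.com",
--             "Flanagan, D. (2020). JavaScript: The definitive guide (7th ed.). O'Reilly Media. Retrieved from https://www.oreilly.com",
--             "Robbins, J. N. (2018). Learning web design: A beginner's guide to HTML, CSS, JavaScript (5th ed.). O'Reilly. Retrieved from https://www.oreilly.com",
--             "Nielsen, J., & Norman, D. A. (2014). Usability 101: Introduction to usability. Nielsen Norman Group. Retrieved from https://www.nngroup.com",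
--             "Mozilla Foundation. (2023). Web development documentation and standards. Retrieved from https://developer.mozilla.org"
--         ]
--     # Business/Management references
--     elif any(term in content_lower for term in ['business', 'management', 'leadership', 'entrepreneurship', 'accounting', 'finance']):
--         references = [
--             "Drucker, P. F. (2006). The effective executive: The definitive guide to getting the right things done. Harper Business. Retrieved from https://www.harperbusiness.com",
--             "Porter, M. E. (2008). Competitive advantage: Creating and sustaining superior performance. Free Press. Retrieved from https://www.simonandschuster.com",
--             "Mintzberg, H. (2009). Managing. Berrett-Koehler Publishers. Retrieved from https://www.bkconnection.com",
--             "Kotter, J. P. (2012). Leading change. Harvard Business Review Press. Retrieved from https://hbr.org",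
--             "Covey, S. R. (2004). The 7 habits of highly effective people. Free Press. Retrieved from https://www.franklincovey.com"
--         ]
--     # General TVET/Technical references
--     else:
--         references = [
--             "Rwanda Education Board. (2021). TVET curriculum framework. REB Publications. Retrieved from https://www.reb.rw",
--             "UNESCO-UNEVOC. (2020). Technical and vocational education and training (TVET) and the sustainable development goals (SDGs). UNESCO Publications. Retrieved from https://www.unevoc.unesco.org",
--             "Ministry of Education Rwanda. (2022). Competency-based training guidelines for technical and vocational education. MINEDUC. Retrieved from https://www.mineduc.gov.rw",
--             "Rwanda Technical and Vocational Education and Training Board. (2023). National module guidelines and standards. RTVETB Publications. Retrieved from https://www.rtvetb.rw",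
--             "International Labour Organization. (2021). World employment and social outlook: The role of digital labour platforms. ILO. Retrieved from https://www.ilo.org"
--         ]
--
--     # Format as numbered list
--     formatted_refs = []
--     for i, ref in enumerate(references[:5], 1):
--         formatted_refs.append(f"{i}. {ref}")
--
--     return '\n\n'.join(formatted_refs)
-- ===== SOURCE B (Python) =====
-- _TERM_GROUPS = [
--     ['programming', 'python', 'java', 'code', 'software', 'variable', 'datatype', 'algorithm', 'loop', 'array', 'function'],
--     ['network', 'cisco', 'routing', 'switching', 'tcp', 'ip', 'internet', 'firewall'],
--     ['database', 'sql', 'mysql', 'data management', 'data modeling', 'nosql'],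
--     ['web', 'html', 'css', 'javascript', 'frontend', 'responsive', 'react', 'vue'],
--     ['business', 'management', 'leadership', 'entrepreneurship', 'accounting', 'finance'],
-- ]
--
-- # keyword -> priority (index of its category); keywords are distinct across groups
-- _KEYWORD_PRIORITY = {t: i for i, g in enumerate(_TERM_GROUPS) for t in g}
--
-- _REF_LISTS = [
--     [
--         "Deitel, P., & Deitel, H. (2019). Python for programmers. Pearson Education. Retrieved from https://www.pearson.com",
--         "McConnell, S. (2004). Code complete: A practical handbook of software construction. Microsoft Press. Retrieved from https://www.microsoft.com",
--         "Matthes, E. (2019). Python crash course: A hands-on, project-based introduction to programming. No Starch Press. Retrieved from https://www.nostarch.com",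
--         "Downey, A. (2015). Think Python: How to think like a computer scientist. O'Reilly Media. Retrieved from https://www.oreilly.com",
--         "Hunt, A., & Thomas, D. (2019). The pragmatic programmer (2nd ed.). Addison-Wesley. Retrieved from https://pragprog.com"
--     ],
--     [
--         "Tanenbaum, A. S., & Wetherall, D. J. (2021). Computer networks (6th ed.). Pearson Education. Retrieved from https://www.pearson.com",
--         "Kurose, J. F., & Ross, K. W. (2020). Computer networking: A top-down approach (8th ed.). Pearson. Retrieved from https://www.pearson.com",
--         "Odom, W. (2019). CCNA 200-301 official cert guide library (2nd ed.). Cisco Press. Retrieved from https://www.ciscopress.com",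
--         "Cisco Networking Academy. (2020). CCNA routing and switching course materials. Cisco Systems. Retrieved from https://www.cisco.com",
--         "Doyle, J. C., Alderson, D. L., & Willinger, W. (2015). Internet topology and the evolution of the Internet. ACM Transactions. Retrieved from https://www.acm.org"
--     ],
--     [
--         "Elmasri, R., & Navathe, S. B. (2020). Fundamentals of database systems (8th ed.). Pearson Education. Retrieved from https://www.pearson.com",
--         "Coronel, C., & Morris, S. (2019). Database systems: Design, implementation, and management (13th ed.). Cengage. Retrieved from https://www.cengage.com",
--         "Beaulieu, A. (2020). Learning SQL: Generate, manipulate, and retrieve data (3rd ed.). O'Reilly Media. Retrieved from https://www.oreilly.com",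
--         "Garcia-Molina, H., Ullman, J. D., & Widom, J. (2008). Database systems: The complete book (2nd ed.). Prentice Hall. Retrieved from https://www.pearson.com",
--         "DuBois, P. (2020). MySQL cookbook: Solutions for database developers and administrators. O'Reilly. Retrieved from https://www.oreilly.com"
--     ],
--     [
--         "Duckett, J. (2014). HTML and CSS: Design and build websites. Wiley Publishing. Retrieved from https://www.wiley.com",
--         "Flanagan, D. (2020). JavaScript: The definitive guide (7th ed.). O'Reilly Media. Retrieved from https://www.oreilly.com",
--         "Robbins, J. N. (2018). Learning web design: A beginner's guide to HTML, CSS, JavaScript (5th ed.). O'Reilly. Retrieved from https://www.oreilly.com",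
--         "Nielsen, J., & Norman, D. A. (2014). Usability 101: Introduction to usability. Nielsen Norman Group. Retrieved from https://www.nngroup.com",
--         "Mozilla Foundation. (2023). Web development documentation and standards. Retrieved from https://developer.mozilla.org"
--     ],
--     [
--         "Drucker, P. F. (2006). The effective executive: The definitive guide to getting the right things done. Harper Business. Retrieved from https://www.harperbusiness.com",
--         "Porter, M. E. (2008). Competitive advantage: Creating and sustaining superior performance. Free Press. Retrieved from https://www.simonandschuster.com",
--         "Mintzberg, H. (2009). Managing. Berrett-Koehler Publishers. Retrieved from https://www.bkconnection.com",
--         "Kotter, J. P. (2012). Leading change. Harvard Business Review Press. Retrieved from https://hbr.org",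
--         "Covey, S. R. (2004). The 7 habits of highly effective people. Free Press. Retrieved from https://www.franklincovey.com"
--     ],
--     [
--         "Rwanda Education Board. (2021). TVET curriculum framework. REB Publications. Retrieved from https://www.reb.rw",
--         "UNESCO-UNEVOC. (2020). Technical and vocational education and training (TVET) and the sustainable development goals (SDGs). UNESCO Publications. Retrieved from https://www.unevoc.unesco.org",
--         "Ministry of Education Rwanda. (2022). Competency-based training guidelines for technical and vocational education. MINEDUC. Retrieved from https://www.mineduc.gov.rw",
--         "Rwanda Technical and Vocational Education and Training Board. (2023). National module guidelines and standards. RTVETB Publications. Retrieved from https://www.rtvetb.rw",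
--         "International Labour Organization. (2021). World employment and social outlook: The role of digital labour platforms. ILO. Retrieved from https://www.ilo.org"
--     ],
-- ]
--
--
-- def get_default_references(module, topic, learning_outcomes, indicative_contents):
--     """Get default static references based on content (flat keyword-priority dict + argmin)."""
--     content_lower = f"{topic} {module}".lower() if topic and module else ""
--     # minimum category index among all matching keywords; default = the general TVET list
--     best = min((p for t, p in _KEYWORD_PRIORITY.items() if t in content_lower),
--                default=len(_TERM_GROUPS))
--     return '\n\n'.join(f"{i}. {r}" for i, r in enumerate(_REF_LISTS[best][:5], 1))
-- ===== Notes on version B (the rewrite author's own statement) =====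
-- stated objective: alternative
-- what changed: Replaces the ordered per-group any()-dispatch (if/elif chain) with a flat keyword->category-priority dict built once; B scans all keywords, takes the minimum matching priority (default = general list) and indexes a list of reference lists, with no per-group any() and no short-circuit.
import Mathlib
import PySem

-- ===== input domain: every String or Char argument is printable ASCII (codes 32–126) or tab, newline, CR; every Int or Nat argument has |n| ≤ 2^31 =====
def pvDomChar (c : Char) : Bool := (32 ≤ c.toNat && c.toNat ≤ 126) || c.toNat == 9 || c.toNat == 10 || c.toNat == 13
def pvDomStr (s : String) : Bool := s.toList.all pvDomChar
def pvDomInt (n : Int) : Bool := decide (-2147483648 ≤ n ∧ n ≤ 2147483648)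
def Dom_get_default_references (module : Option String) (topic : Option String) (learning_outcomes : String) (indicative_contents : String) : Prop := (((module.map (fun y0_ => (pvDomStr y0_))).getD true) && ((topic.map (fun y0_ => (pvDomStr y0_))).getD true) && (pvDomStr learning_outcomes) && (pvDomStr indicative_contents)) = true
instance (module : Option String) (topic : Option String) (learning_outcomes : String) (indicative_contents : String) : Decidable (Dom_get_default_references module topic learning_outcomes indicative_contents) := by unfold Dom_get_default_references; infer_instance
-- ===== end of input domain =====

-- B replaces A's ordered per-group any()-dispatch with a flat keyword->priority map built once:
-- it takes the minimum category priority among all matching keywords (default = general list)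
-- and indexes a list of reference lists (objective: alternative).

def pvRefsProgramming : List String :=
  ["Deitel, P., & Deitel, H. (2019). Python for programmers. Pearson Education. Retrieved from https://www.pearson.com",
   "McConnell, S. (2004). Code complete: A practical handbook of software construction. Microsoft Press. Retrieved from https://www.microsoft.com",
   "Matthes, E. (2019). Python crash course: A hands-on, project-based introduction to programming. No Starch Press. Retrieved from https://www.nostarch.com",
   "Downey, A. (2015). Think Python: How to think like a computer scientist. O'Reilly Media. Retrieved from https://www.oreilly.com",
   "Hunt, A., & Thomas, D. (2019). The pragmatic programmer (2nd ed.). Addison-Wesley. Retrieved from https://pragprog.com"]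

def pvRefsNetworking : List String :=
  ["Tanenbaum, A. S., & Wetherall, D. J. (2021). Computer networks (6th ed.). Pearson Education. Retrieved from https://www.pearson.com",
   "Kurose, J. F., & Ross, K. W. (2020). Computer networking: A top-down approach (8th ed.). Pearson. Retrieved from https://www.pearson.com",
   "Odom, W. (2019). CCNA 200-301 official cert guide library (2nd ed.). Cisco Press. Retrieved from https://www.ciscopress.com",
   "Cisco Networking Academy. (2020). CCNA routing and switching course materials. Cisco Systems. Retrieved from https://www.cisco.com",
   "Doyle, J. C., Alderson, D. L., & Willinger, W. (2015). Internet topology and the evolution of the Internet. ACM Transactions. Retrieved from https://www.acm.org"]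

def pvRefsDatabase : List String :=
  ["Elmasri, R., & Navathe, S. B. (2020). Fundamentals of database systems (8th ed.). Pearson Education. Retrieved from https://www.pearson.com",
   "Coronel, C., & Morris, S. (2019). Database systems: Design, implementation, and management (13th ed.). Cengage. Retrieved from https://www.cengage.com",
   "Beaulieu, A. (2020). Learning SQL: Generate, manipulate, and retrieve data (3rd ed.). O'Reilly Media. Retrieved from https://www.oreilly.com",
   "Garcia-Molina, H., Ullman, J. D., & Widom, J. (2008). Database systems: The complete book (2nd ed.). Prentice Hall. Retrieved from https://www.pearson.com",
   "DuBois, P. (2020). MySQL cookbook: Solutions for database developers and administrators. O'Reilly. Retrieved from https://www.oreilly.com"]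

def pvRefsWeb : List String :=
  ["Duckett, J. (2014). HTML and CSS: Design and build websites. Wiley Publishing. Retrieved from https://www.wiley.com",
   "Flanagan, D. (2020). JavaScript: The definitive guide (7th ed.). O'Reilly Media. Retrieved from https://www.oreilly.com",
   "Robbins, J. N. (2018). Learning web design: A beginner's guide to HTML, CSS, JavaScript (5th ed.). O'Reilly. Retrieved from https://www.oreilly.com",
   "Nielsen, J., & Norman, D. A. (2014). Usability 101: Introduction to usability. Nielsen Norman Group. Retrieved from https://www.nngroup.com",
   "Mozilla Foundation. (2023). Web development documentation and standards. Retrieved from https://developer.mozilla.org"]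

def pvRefsBusiness : List String :=
  ["Drucker, P. F. (2006). The effective executive: The definitive guide to getting the right things done. Harper Business. Retrieved from https://www.harperbusiness.com",
   "Porter, M. E. (2008). Competitive advantage: Creating and sustaining superior performance. Free Press. Retrieved from https://www.simonandschuster.com",
   "Mintzberg, H. (2009). Managing. Berrett-Koehler Publishers. Retrieved from https://www.bkconnection.com",
   "Kotter, J. P. (2012). Leading change. Harvard Business Review Press. Retrieved from https://hbr.org",
   "Covey, S. R. (2004). The 7 habits of highly effective people. Free Press. Retrieved from https://www.franklincovey.com"]

def pvRefsDefault : List String :=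
  ["Rwanda Education Board. (2021). TVET curriculum framework. REB Publications. Retrieved from https://www.reb.rw",
   "UNESCO-UNEVOC. (2020). Technical and vocational education and training (TVET) and the sustainable development goals (SDGs). UNESCO Publications. Retrieved from https://www.unevoc.unesco.org",
   "Ministry of Education Rwanda. (2022). Competency-based training guidelines for technical and vocational education. MINEDUC. Retrieved from https://www.mineduc.gov.rw",
   "Rwanda Technical and Vocational Education and Training Board. (2023). National module guidelines and standards. RTVETB Publications. Retrieved from https://www.rtvetb.rw",
   "International Labour Organization. (2021). World employment and social outlook: The role of digital labour platforms. ILO. Retrieved from https://www.ilo.org"]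

def pvTermsProgramming : List String :=
  ["programming", "python", "java", "code", "software", "variable", "datatype", "algorithm", "loop", "array", "function"]

def pvTermsNetworking : List String :=
  ["network", "cisco", "routing", "switching", "tcp", "ip", "internet", "firewall"]

def pvTermsDatabase : List String :=
  ["database", "sql", "mysql", "data management", "data modeling", "nosql"]

def pvTermsWeb : List String :=
  ["web", "html", "css", "javascript", "frontend", "responsive", "react", "vue"]

def pvTermsBusiness : List String :=
  ["business", "management", "leadership", "entrepreneurship", "accounting", "finance"]

-- content_lower = f"{topic} {module}".lower() if topic and module else ""
-- (topic/module are truthy iff they are non-None and non-empty strings)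
def pvContentLower (module : Option String) (topic : Option String) : String :=
  match topic, module with
  | some t, some m => if t = "" ∨ m = "" then "" else PySem.Str.lower (t ++ " " ++ m)
  | _, _ => ""

-- any(term in content_lower for term in terms)
def pvAnyIn (terms : List String) (content : String) : Bool :=
  terms.any (fun term => PySem.Str.isIn term content)

-- ===== PORT A =====
def get_default_references (module : Option String) (topic : Option String) (learning_outcomes : String) (indicative_contents : String) : String :=
  let content_lower := pvContentLower module topic
  let references : List String :=
    if pvAnyIn pvTermsProgramming content_lower then pvRefsProgramming
    else if pvAnyIn pvTermsNetworking content_lower then pvRefsNetworking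
    else if pvAnyIn pvTermsDatabase content_lower then pvRefsDatabase
    else if pvAnyIn pvTermsWeb content_lower then pvRefsWeb
    else if pvAnyIn pvTermsBusiness content_lower then pvRefsBusiness
    else pvRefsDefault
  -- for i, ref in enumerate(references[:5], 1): formatted_refs.append(f"{i}. {ref}")
  let formatted_refs : List String :=
    (PySem.List.enumerate (PySem.List.slice references none (some 5)) 1).foldl
      (fun acc p => acc ++ [PySem.Int.toStr p.1 ++ ". " ++ p.2]) []
  PySem.Str.join "\n\n" formatted_refs

-- ===== PORT B =====
-- _REF_LISTS: the six reference lists, category order then the general default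
def pvRefLists : List (List String) :=
  [pvRefsProgramming, pvRefsNetworking, pvRefsDatabase, pvRefsWeb, pvRefsBusiness, pvRefsDefault]

-- _KEYWORD_PRIORITY = {t: i for i, g in enumerate(_TERM_GROUPS) for t in g}
-- (keywords are distinct across groups, so the dict is this flat association list)
def pvKeywordPriority : List (String × Nat) :=
  pvTermsProgramming.map (fun t => (t, 0)) ++
  pvTermsNetworking.map (fun t => (t, 1)) ++
  pvTermsDatabase.map (fun t => (t, 2)) ++
  pvTermsWeb.map (fun t => (t, 3)) ++
  pvTermsBusiness.map (fun t => (t, 4))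

-- min((p for t, p in _KEYWORD_PRIORITY.items() if t in content_lower), default=5):
-- every priority is < 5, so folding min from 5 over the matching pairs is exact
def pvBest (content : String) : Nat :=
  pvKeywordPriority.foldl (fun b p => if PySem.Str.isIn p.1 content then min b p.2 else b) 5

def get_default_references_alt (module : Option String) (topic : Option String) (learning_outcomes : String) (indicative_contents : String) : String :=
  let content_lower := pvContentLower module topic
  let best := pvBest content_lower
  -- _REF_LISTS[best]: 0 ≤ best ≤ 5 < 6 = len(_REF_LISTS), so getD is exact indexing
  PySem.Str.join "\n\n"
    ((PySem.List.enumerate (PySem.List.slice (pvRefLists.getD best []) none (some 5)) 1).map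
      (fun p => PySem.Int.toStr p.1 ++ ". " ++ p.2))

-- ===== PRECONDITION & SPEC =====
def Spec_get_default_references (module : Option String) (topic : Option String) (learning_outcomes : String) (indicative_contents : String) (out : String) : Prop := out = get_default_references_alt module topic learning_outcomes indicative_contents
instance (module : Option String) (topic : Option String) (learning_outcomes : String) (indicative_contents : String) (out : String) : Decidable (Spec_get_default_references module topic learning_outcomes indicative_contents out) := by unfold Spec_get_default_references; infer_instance

-- ===== CLAIM =====
def Claim_equal_get_default_references : Prop := ∀ (module : Option String) (topic : Option String) (learning_outcomes : String) (indicative_contents : String), Dom_get_default_references module topic learning_outcomes indicative_contents → Spec_get_default_references module topic learning_outcomes indicative_contents (get_default_references module topic learning_outcomes indicative_contents)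

-- ===== LEMMAS AND PROOFS =====
-- A's append loop builds exactly the mapped list
theorem pvFoldl_append_eq_map (l : List (Int × String)) (acc : List String) :
    l.foldl (fun a p => a ++ [PySem.Int.toStr p.1 ++ ". " ++ p.2]) acc
      = acc ++ l.map (fun p => PySem.Int.toStr p.1 ++ ". " ++ p.2) := by
  induction l generalizing acc with
  | nil => simp
  | cons x xs ih => simp [List.foldl_cons, ih]

-- folding min over one keyword group (constant priority k) starting at b
theorem pvFold_group (terms : List String) (k : Nat) (c : String) (b : Nat) :
    (terms.map (fun t => (t, k))).foldl
        (fun b p => if PySem.Str.isIn p.1 c then min b p.2 else b) b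
      = if pvAnyIn terms c then min b k else b := by
  induction terms generalizing b with
  | nil => simp [pvAnyIn]
  | cons t ts ih =>
    simp only [List.map_cons, List.foldl_cons]
    by_cases h : PySem.Str.isIn t c = true
    · rw [if_pos h, ih]
      have ha : pvAnyIn (t :: ts) c = true := by
        unfold pvAnyIn; rw [List.any_cons, h, Bool.true_or]
      rw [if_pos ha]
      by_cases h2 : pvAnyIn ts c = true
      · rw [if_pos h2, min_assoc, min_self]
      · rw [if_neg h2]
    · rw [if_neg h, ih]
      have ha : pvAnyIn (t :: ts) c = pvAnyIn ts c := by
        unfold pvAnyIn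
        rw [List.any_cons, Bool.eq_false_iff.2 h, Bool.false_or]
      rw [ha]

theorem pvBest_eq (c : String) :
    pvBest c =
      (if pvAnyIn pvTermsProgramming c then 0
       else if pvAnyIn pvTermsNetworking c then 1
       else if pvAnyIn pvTermsDatabase c then 2
       else if pvAnyIn pvTermsWeb c then 3
       else if pvAnyIn pvTermsBusiness c then 4
       else 5) := by
  unfold pvBest pvKeywordPriority
  rw [List.foldl_append, List.foldl_append, List.foldl_append, List.foldl_append]
  rw [pvFold_group, pvFold_group, pvFold_group, pvFold_group, pvFold_group]
  by_cases h0 : pvAnyIn pvTermsProgramming c <;>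
  by_cases h1 : pvAnyIn pvTermsNetworking c <;>
  by_cases h2 : pvAnyIn pvTermsDatabase c <;>
  by_cases h3 : pvAnyIn pvTermsWeb c <;>
  by_cases h4 : pvAnyIn pvTermsBusiness c <;>
  simp [h0, h1, h2, h3, h4]

-- ===== VERDICT =====
theorem get_default_references_spec : Claim_equal_get_default_references := by
  intro module topic learning_outcomes indicative_contents _
  unfold Spec_get_default_references get_default_references get_default_references_alt
  simp only [pvFoldl_append_eq_map, pvBest_eq, List.nil_append]
  by_cases h0 : pvAnyIn pvTermsProgramming (pvContentLower module topic) <;>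
  by_cases h1 : pvAnyIn pvTermsNetworking (pvContentLower module topic) <;>
  by_cases h2 : pvAnyIn pvTermsDatabase (pvContentLower module topic) <;>
  by_cases h3 : pvAnyIn pvTermsWeb (pvContentLower module topic) <;>
  by_cases h4 : pvAnyIn pvTermsBusiness (pvContentLower module topic) <;>
  simp [h0, h1, h2, h3, h4, pvRefLists]
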